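-- pv_equiv track=rewrite | github.com/afield0/injector_tester | desktop_app/protocol.py | _is_help_line
-- ===== SOURCE A (Python) =====
-- from enum import Enum
--
-- class CommandName(str, Enum):
--     HELP = "HELP"
--     STATUS = "STATUS"
--     MODEL = "MODEL"
--     SET = "SET"
--     START = "START"
--     RUN = "RUN"
--     STOP = "STOP"
--     STARTALL = "STARTALL"
--     STOPALL = "STOPALL"
--
-- def _is_help_line(line: str) -> bool:
--     return (
--         line == "Models:"
--         or line in {name.value for name in CommandName}
--         or line.startswith("0 = ")
--         or line.startswith("1 = ")
--         or any(line.startswith(f"{name.value} ") for name in CommandName)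
--     )
-- ===== SOURCE B (Python) =====
-- # B: single left-to-right character scan doing simultaneous multi-pattern matching:
-- # a shrinking list of active candidate (remaining-suffix, kind) pairs replaces A's
-- # independent equality / set-membership / startswith tests per pattern.
-- _EXACT, _WORD, _PREFIX = 0, 1, 2
-- _PATTERNS = [
--     ("Models:", _EXACT), ("0 = ", _PREFIX), ("1 = ", _PREFIX),
--     ("HELP", _WORD), ("STATUS", _WORD), ("MODEL", _WORD), ("SET", _WORD),
--     ("START", _WORD), ("RUN", _WORD), ("STOP", _WORD),
--     ("STARTALL", _WORD), ("STOPALL", _WORD),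
-- ]
--
-- def _is_help_line(line: str) -> bool:
--     cands = _PATTERNS
--     for ch in line:
--         for suf, kind in cands:
--             if not suf and (kind == _PREFIX or (kind == _WORD and ch == " ")):
--                 return True
--         cands = [(suf[1:], kind) for suf, kind in cands if suf and suf[0] == ch]
--     return any(not suf for suf, _kind in cands)
-- ===== Notes on version B (the rewrite author's own statement) =====
-- stated objective: alternative
-- what changed: B performs one left-to-right scan of the line doing simultaneous multi-pattern matching with a shrinking list of active candidate (remaining-suffix, kind) pairs, instead of A's independent equality, set-membership and startswith tests per pattern.
import Mathlib
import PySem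

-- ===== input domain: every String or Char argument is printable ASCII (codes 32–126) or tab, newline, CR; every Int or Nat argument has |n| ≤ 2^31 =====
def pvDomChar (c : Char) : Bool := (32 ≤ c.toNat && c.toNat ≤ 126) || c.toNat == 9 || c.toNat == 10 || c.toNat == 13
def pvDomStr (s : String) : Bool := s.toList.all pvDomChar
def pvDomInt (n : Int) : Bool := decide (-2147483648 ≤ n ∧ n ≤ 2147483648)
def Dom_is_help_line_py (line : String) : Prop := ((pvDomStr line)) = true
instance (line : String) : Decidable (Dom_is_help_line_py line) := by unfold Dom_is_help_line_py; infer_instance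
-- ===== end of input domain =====

-- B replaces A's independent per-pattern tests by one left-to-right character scan that
-- keeps a shrinking list of active candidate patterns (simultaneous multi-pattern match): alternative.

-- ===== PORT A =====
-- the CommandName enum values, in declaration order
def pvCommandNames : List (List Char) :=
  ["HELP".toList, "STATUS".toList, "MODEL".toList, "SET".toList, "START".toList,
   "RUN".toList, "STOP".toList, "STARTALL".toList, "STOPALL".toList]

def is_help_line_py (line : String) : Bool :=
  let l := line.toList
  (l == "Models:".toList)
    || decide (l ∈ PySem.Set.ofList pvCommandNames)
    || PySem.Chars.startswith l "0 = ".toList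
    || PySem.Chars.startswith l "1 = ".toList
    || pvCommandNames.any (fun name => PySem.Chars.startswith l (name ++ [' ']))

-- ===== PORT B =====
-- pattern kinds: _EXACT, _WORD, _PREFIX
inductive PvKind where
  | exact : PvKind
  | word : PvKind
  | pfx : PvKind
deriving DecidableEq, Repr

-- B's constant _PATTERNS
def pvPatterns : List (List Char × PvKind) :=
  [("Models:".toList, PvKind.exact), ("0 = ".toList, PvKind.pfx), ("1 = ".toList, PvKind.pfx),
   ("HELP".toList, PvKind.word), ("STATUS".toList, PvKind.word), ("MODEL".toList, PvKind.word),
   ("SET".toList, PvKind.word), ("START".toList, PvKind.word), ("RUN".toList, PvKind.word),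
   ("STOP".toList, PvKind.word), ("STARTALL".toList, PvKind.word), ("STOPALL".toList, PvKind.word)]

-- B's `for ch in line` loop: early-return check, then advance the candidate list
def pvLoop : List (List Char × PvKind) → List Char → Bool
  | cands, [] => cands.any (fun p => p.1.isEmpty)
  | cands, c :: rest =>
    if cands.any (fun p =>
        p.1.isEmpty && (p.2 == PvKind.pfx || (p.2 == PvKind.word && c == ' ')))
    then true
    else pvLoop (cands.filterMap (fun p =>
        match p.1 with
        | [] => none
        | x :: t => if x = c then some (t, p.2) else none)) rest

def is_help_line_py_alt (line : String) : Bool :=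
  pvLoop pvPatterns line.toList

-- ===== PRECONDITION & SPEC =====
def Spec_is_help_line_py (line : String) (out : Bool) : Prop := out = is_help_line_py_alt line
instance (line : String) (out : Bool) : Decidable (Spec_is_help_line_py line out) := by unfold Spec_is_help_line_py; infer_instance

-- ===== CLAIM (what is proved, stated in full; the proofs are below) =====
def Claim_equal_is_help_line_py : Prop := ∀ (line : String), Dom_is_help_line_py line → Spec_is_help_line_py line (is_help_line_py line)

-- ===== LEMMAS AND PROOFS =====

-- what a candidate (remaining suffix, kind) means about the remaining line
def pvMatch : List Char × PvKind → List Char → Prop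
  | (suf, PvKind.exact), l => l = suf
  | (suf, PvKind.pfx), l => suf <+: l
  | (suf, PvKind.word), l => l = suf ∨ suf ++ [' '] <+: l

lemma pvMatch_nil (p : List Char × PvKind) : pvMatch p [] ↔ p.1 = [] := by
  obtain ⟨suf, k⟩ := p
  cases k <;> cases suf <;> simp [pvMatch, List.prefix_nil]

lemma pvMatch_cons (suf : List Char) (k : PvKind) (c : Char) (rest : List Char) :
    pvMatch (suf, k) (c :: rest) ↔
      (suf = [] ∧ (k = PvKind.pfx ∨ (k = PvKind.word ∧ c = ' '))) ∨
      (∃ t, suf = c :: t ∧ pvMatch (t, k) rest) := by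
  cases k <;> cases suf <;> simp [pvMatch, List.cons_prefix_iff] <;> tauto

lemma pvLoop_iff (l : List Char) (cands : List (List Char × PvKind)) :
    pvLoop cands l = true ↔ ∃ p ∈ cands, pvMatch p l := by
  induction l generalizing cands with
  | nil =>
    simp [pvLoop, List.any_eq_true, pvMatch_nil, List.isEmpty_iff]
  | cons c rest ih =>
    rw [pvLoop]
    split_ifs with hearly
    · simp only [true_iff]
      obtain ⟨p, hp, hcond⟩ := List.any_eq_true.mp hearly
      obtain ⟨suf, k⟩ := p
      simp only [Bool.and_eq_true, Bool.or_eq_true, beq_iff_eq, List.isEmpty_iff] at hcond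
      exact ⟨(suf, k), hp, (pvMatch_cons suf k c rest).mpr (Or.inl ⟨hcond.1, by
        rcases hcond.2 with h | h
        · exact Or.inl h
        · exact Or.inr ⟨h.1, h.2⟩⟩)⟩
    · rw [ih]
      constructor
      · rintro ⟨q, hq, hm⟩
        rw [List.mem_filterMap] at hq
        obtain ⟨p, hp, hpq⟩ := hq
        obtain ⟨suf, k⟩ := p
        cases suf with
        | nil => simp at hpq
        | cons x t =>
          by_cases hx : x = c
          · simp [hx] at hpq
            refine ⟨(x :: t, k), hp, (pvMatch_cons _ _ _ _).mpr (Or.inr ⟨t, by simp [hx], ?_⟩)⟩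
            rw [show q = (t, k) from hpq.symm] at hm
            exact hm
          · simp [hx] at hpq
      · rintro ⟨p, hp, hm⟩
        obtain ⟨suf, k⟩ := p
        rcases (pvMatch_cons suf k c rest).mp hm with ⟨hnil, hk⟩ | ⟨t, hsuf, hm'⟩
        · exfalso
          apply hearly
          refine List.any_eq_true.mpr ⟨(suf, k), hp, ?_⟩
          simp only [Bool.and_eq_true, Bool.or_eq_true, beq_iff_eq, List.isEmpty_iff]
          exact ⟨hnil, by tauto⟩
        · refine ⟨(t, k), ?_, hm'⟩
          rw [List.mem_filterMap]
          exact ⟨(suf, k), hp, by simp [hsuf]⟩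

-- propositional rearrangement of the two 21-atom disjunctions
lemma pv_shuffle (m h s md se st r sp sal sol p0 p1 H S M SE ST R SP SA SO : Prop) :
    ((((m ∨ h ∨ s ∨ md ∨ se ∨ st ∨ r ∨ sp ∨ sal ∨ sol) ∨ p0) ∨ p1) ∨
        H ∨ S ∨ M ∨ SE ∨ ST ∨ R ∨ SP ∨ SA ∨ SO) ↔
      (m ∨ p0 ∨ p1 ∨ (h ∨ H) ∨ (s ∨ S) ∨ (md ∨ M) ∨ (se ∨ SE) ∨ (st ∨ ST) ∨
        (r ∨ R) ∨ (sp ∨ SP) ∨ (sal ∨ SA) ∨ sol ∨ SO) := by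
  tauto

-- ===== VERDICT (by name: the statement is the Claim_ definition above) =====
theorem is_help_line_py_spec : Claim_equal_is_help_line_py := by
  intro line _
  unfold Spec_is_help_line_py
  rw [Bool.eq_iff_iff]
  simp only [is_help_line_py, is_help_line_py_alt, pvLoop_iff, pvPatterns, pvCommandNames,
    PySem.Set.mem_ofList, List.mem_cons, List.not_mem_nil, or_false,
    List.any_cons, List.any_nil, Bool.or_eq_true, Bool.or_false,
    beq_iff_eq, decide_eq_true_eq, PySem.Chars.startswith_iff,
    exists_eq_or_imp, exists_eq_left, pvMatch]
  exact pv_shuffle _ _ _ _ _ _ _ _ _ _ _ _ _ _ _ _ _ _ _ _ _
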